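-- pv_equiv track=rewrite | github.com/Koraavo/Jetedu-final-files | Matrices/inverse_2.py | cominors_all_elements
-- ===== SOURCE A (Python) =====
-- def cominors_all_elements(matrix):
--     matrix_all = []
--     for j in range(len(matrix)):
--         copy_matrix = matrix[:]
--         row_pop = j
--         matrix_row_removal = copy_matrix.pop(row_pop)
--         for i in range(len(matrix)):
--             matrix_all.append([item[:i] + item[i + 1:] for item in copy_matrix])
--     return matrix_all
-- ===== SOURCE B (Python) =====
-- def cominors_all_elements(matrix):
--     n = len(matrix)
--     col_removed = [[row[:i] + row[i + 1:] for row in matrix] for i in range(n)]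
--     return [cr[:j] + cr[j + 1:] for j in range(n) for cr in col_removed]
-- ===== Notes on version B (the rewrite author's own statement) =====
-- stated objective: alternative
-- what changed: B precomputes in one pass a table of column-removed matrices and then, instead of re-popping a row and re-slicing every row per (j,i) pair, just deletes row j from each precomputed table entry by list slicing.
import Mathlib
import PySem

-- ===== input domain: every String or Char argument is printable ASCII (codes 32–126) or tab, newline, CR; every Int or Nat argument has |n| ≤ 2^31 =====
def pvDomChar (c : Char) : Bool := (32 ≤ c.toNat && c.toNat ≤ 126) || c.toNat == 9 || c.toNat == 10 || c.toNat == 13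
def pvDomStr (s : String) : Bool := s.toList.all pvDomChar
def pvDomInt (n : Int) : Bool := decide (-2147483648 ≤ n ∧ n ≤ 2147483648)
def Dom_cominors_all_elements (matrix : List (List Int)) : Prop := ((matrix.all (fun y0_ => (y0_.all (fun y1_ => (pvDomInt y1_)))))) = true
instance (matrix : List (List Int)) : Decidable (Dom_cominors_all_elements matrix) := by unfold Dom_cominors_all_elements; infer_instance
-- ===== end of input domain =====

-- B precomputes the column-removed matrices once and then deletes row j by slicing,
-- instead of re-popping a row and re-slicing every row per (j,i) pair; objective: alternative decomposition.

-- ===== PORT A =====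
def cominors_all_elements (matrix : List (List Int)) : List (List (List Int)) :=
  (PySem.List.pyRange 0 (matrix.length : Int) 1).foldl (fun matrix_all j =>
    -- copy_matrix = matrix[:]; copy_matrix.pop(j)
    match PySem.List.pop? matrix j with
    | none => matrix_all
    | some (_, copy_matrix) =>
      (PySem.List.pyRange 0 (matrix.length : Int) 1).foldl (fun acc i =>
        acc ++ [copy_matrix.map (fun item =>
          PySem.List.slice item none (some i) ++ PySem.List.slice item (some (i + 1)) none)]) matrix_all) []

-- ===== PORT B =====
def cominors_all_elements_alt (matrix : List (List Int)) : List (List (List Int)) :=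
  let n : Int := matrix.length
  let colRemoved := (PySem.List.pyRange 0 n 1).map (fun i =>
    matrix.map (fun row => PySem.List.slice row none (some i) ++ PySem.List.slice row (some (i + 1)) none))
  ((PySem.List.pyRange 0 n 1).map (fun j =>
    colRemoved.map (fun cr =>
      PySem.List.slice cr none (some j) ++ PySem.List.slice cr (some (j + 1)) none))).flatten

-- ===== PRECONDITION & SPEC =====
def Spec_cominors_all_elements (matrix : List (List Int)) (out : List (List (List Int))) : Prop := out = cominors_all_elements_alt matrix
instance (matrix : List (List Int)) (out : List (List (List Int))) : Decidable (Spec_cominors_all_elements matrix out) := by unfold Spec_cominors_all_elements; infer_instance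

-- ===== CLAIM (what is proved, stated in full; the proofs are below) =====
def Claim_equal_cominors_all_elements : Prop := ∀ (matrix : List (List Int)), Dom_cominors_all_elements matrix → Spec_cominors_all_elements matrix (cominors_all_elements matrix)

-- ===== LEMMAS AND PROOFS =====

-- xs[:j] + xs[j+1:] deletes element j (for a nonnegative index)
theorem pv_slice_erase {α : Type} (xs : List α) (j : Int) (h0 : 0 ≤ j) :
    PySem.List.slice xs none (some j) ++ PySem.List.slice xs (some (j + 1)) none = xs.eraseIdx j.toNat := by
  obtain ⟨k, rfl⟩ := Int.eq_ofNat_of_zero_le h0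
  have hk : (k : Int) + 1 = ((k + 1 : Nat) : Int) := by push_cast; ring
  rw [PySem.List.slice_to_natCast, hk, PySem.List.slice_from_natCast,
    List.eraseIdx_eq_take_drop_succ, Int.toNat_natCast]

theorem pv_flatMap_congr_mem {α β : Type} (l : List α) (g1 g2 : α → List β)
    (h : ∀ x ∈ l, g1 x = g2 x) : l.flatMap g1 = l.flatMap g2 := by
  induction l with
  | nil => rfl
  | cons x xs ih =>
    simp only [List.flatMap_cons]
    rw [h x (by simp), ih (fun y hy => h y (by simp [hy]))]

-- A computed as a flatMap characterisation
theorem pv_A_eq (matrix : List (List Int)) :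
    cominors_all_elements matrix =
      (PySem.List.pyRange 0 (matrix.length : Int) 1).flatMap (fun j =>
        (PySem.List.pyRange 0 (matrix.length : Int) 1).map (fun i =>
          (matrix.eraseIdx j.toNat).map (fun item =>
            PySem.List.slice item none (some i) ++ PySem.List.slice item (some (i + 1)) none))) := by
  unfold cominors_all_elements
  rw [PySem.List.foldl_congr_mem _ _
      (fun acc j => acc ++ (PySem.List.pyRange 0 (matrix.length : Int) 1).map (fun i =>
        (matrix.eraseIdx j.toNat).map (fun item =>
          PySem.List.slice item none (some i) ++ PySem.List.slice item (some (i + 1)) none))) []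
      ?_]
  · rw [PySem.List.foldl_append_eq_flatMap]; rfl
  · intro acc j hj
    rw [PySem.List.mem_pyRange_one] at hj
    have hjn : j.toNat < matrix.length := by omega
    have hjc : j = (j.toNat : Int) := by omega
    rw [hjc, PySem.List.pop?_natCast matrix j.toNat hjn]
    exact PySem.List.foldl_append_singleton_eq_map _ _ _

theorem cominors_spec_aux (matrix : List (List Int)) :
    cominors_all_elements matrix = cominors_all_elements_alt matrix := by
  rw [pv_A_eq]
  unfold cominors_all_elements_alt
  rw [← List.flatMap_def]
  apply pv_flatMap_congr_mem
  intro j hj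
  rw [PySem.List.mem_pyRange_one] at hj
  rw [List.map_map]
  apply List.map_congr_left
  intro i _
  simp only [Function.comp]
  rw [pv_slice_erase _ j hj.1, List.eraseIdx_map]

-- ===== VERDICT (by name: the statement is the Claim_ definition above) =====
theorem cominors_all_elements_spec : Claim_equal_cominors_all_elements := by
  intro matrix _
  exact cominors_spec_aux matrix
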